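-- pv_equiv track=rewrite | github.com/CloudsRipple/AAQ | scripts/generate_relationship_tables.py | nearest_project_module
-- ===== SOURCE A (Python) =====
-- def nearest_project_module(modules: set[str], target: str) -> str | None:
--     if target in modules:
--         return target
--     current = target
--     while "." in current:
--         current = current.rsplit(".", 1)[0]
--         if current in modules:
--             return current
--     return None
-- ===== SOURCE B (Python) =====
-- def nearest_project_module(modules: set[str], target: str) -> str | None:
--     # Build every dotted prefix of target (one per '.' position, plus target itself),
--     # keep those present in modules, and return the longest (most specific) one.
--     candidates = [target[:i] for i, ch in enumerate(target) if ch == "."] + [target]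
--     hits = [c for c in candidates if c in modules]
--     return max(hits, key=len) if hits else None
-- ===== Notes on version B (the rewrite author's own statement) =====
-- stated objective: alternative
-- what changed: A walks downward by repeated rsplit with early exit; B builds all dotted prefixes of target at once (one slice per '.' position plus target itself), filters them by membership, and returns the longest surviving one.
import Mathlib
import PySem

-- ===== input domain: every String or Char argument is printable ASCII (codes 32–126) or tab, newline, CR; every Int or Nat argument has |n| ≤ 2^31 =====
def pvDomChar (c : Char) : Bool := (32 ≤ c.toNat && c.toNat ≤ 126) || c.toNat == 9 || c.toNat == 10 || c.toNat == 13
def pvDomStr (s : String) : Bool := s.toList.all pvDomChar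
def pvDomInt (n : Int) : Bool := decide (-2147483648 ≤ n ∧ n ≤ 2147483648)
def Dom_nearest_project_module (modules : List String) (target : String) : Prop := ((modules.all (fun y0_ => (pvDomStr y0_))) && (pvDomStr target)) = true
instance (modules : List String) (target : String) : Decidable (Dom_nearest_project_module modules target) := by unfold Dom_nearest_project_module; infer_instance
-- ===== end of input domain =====

-- B replaces A's repeated-rsplit walk with build-all-dotted-prefixes, filter by membership, take the longest (alternative decomposition, same cost).


-- ===== PORT A =====
-- current.rsplit(".", 1)[0] : exact when '.' occurs in cs (the characters before the LAST '.')
def pyRsplitDotHead (cs : List Char) : List Char :=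
  ((cs.reverse.dropWhile (· ≠ '.')).drop 1).reverse

-- termination fact for the while-loop: rsplit strictly shortens the string (cited by decreasing_by)
theorem pyRsplitDotHead_length_lt (cs : List Char) (h : '.' ∈ cs) :
    (pyRsplitDotHead cs).length < cs.length := by
  unfold pyRsplitDotHead
  have hne : cs.reverse.dropWhile (· ≠ '.') ≠ [] := by
    intro hnil
    rw [List.dropWhile_eq_nil_iff] at hnil
    have := hnil '.' (by simpa using h)
    simp at this
  have hle : (cs.reverse.dropWhile (· ≠ '.')).length ≤ cs.length := by
    simpa using List.length_dropWhile_le (p := (· ≠ '.')) (l := cs.reverse)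
  have hpos : 0 < (cs.reverse.dropWhile (· ≠ '.')).length := List.length_pos_iff.mpr hne
  have hcs : 0 < cs.length := List.length_pos_iff.mpr (by rintro rfl; simp at h)
  simp only [List.length_reverse, List.length_drop]
  omega

-- the 'while "." in current:' loop of A
def nearestLoop (modules : List String) (cs : List Char) : Option String :=
  if h : PySem.Chars.isIn ['.'] cs = true then
    let c := pyRsplitDotHead cs
    if String.ofList c ∈ modules then some (String.ofList c)
    else nearestLoop modules c
  else none
termination_by cs.length
decreasing_by
  exact pyRsplitDotHead_length_lt cs
    ((List.singleton_infix_iff '.' cs).mp ((PySem.Chars.isIn_iff_infix _ _).mp h))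

def nearest_project_module (modules : List String) (target : String) : Option String :=
  if target ∈ modules then some target
  else nearestLoop modules target.toList

-- ===== PORT B =====
def nearest_project_module_alt (modules : List String) (target : String) : Option String :=
  let cs := target.toList
  let candidates := ((PySem.List.enumerate cs 0).filter (fun p => p.2 == '.')).map
      (fun p => PySem.Chars.slice cs none (some p.1)) ++ [cs]
  let hits := candidates.filter (fun c => decide (String.ofList c ∈ modules))
  match PySem.List.max? hits (fun c => c.length) with
  | some m => some (String.ofList m)
  | none => none

-- ===== PRECONDITION & SPEC =====
def Spec_nearest_project_module (modules : List String) (target : String) (out : Option String) : Prop := out = nearest_project_module_alt modules target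
instance (modules : List String) (target : String) (out : Option String) : Decidable (Spec_nearest_project_module modules target out) := by unfold Spec_nearest_project_module; infer_instance

-- ===== CLAIM (what is proved, stated in full; the proofs are below) =====
def Claim_equal_nearest_project_module : Prop := ∀ (modules : List String) (target : String), Dom_nearest_project_module modules target → Spec_nearest_project_module modules target (nearest_project_module modules target)

-- ===== LEMMAS AND PROOFS =====

-- the candidate prefixes B builds from the '.' positions (ascending)
def dotPrefixes (cs : List Char) : List (List Char) :=
  ((PySem.List.enumerate cs 0).filter (fun p => p.2 == '.')).map
    (fun p => PySem.Chars.slice cs none (some p.1))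

theorem dotPrefixes_of_not_mem (cs : List Char) (h : '.' ∉ cs) : dotPrefixes cs = [] := by
  unfold dotPrefixes
  rw [List.filter_eq_nil_iff.mpr, List.map_nil]
  intro p hp
  rw [PySem.List.mem_enumerate_iff] at hp
  obtain ⟨k, hk, rfl⟩ := hp
  simp only [beq_iff_eq]
  intro hc
  exact h (hc ▸ List.getElem_mem hk)

-- split a string containing '.' at its LAST dot
theorem exists_last_dot (cs : List Char) (h : '.' ∈ cs) :
    ∃ l r, cs = l ++ '.' :: r ∧ '.' ∉ r := by
  induction cs using List.reverseRecOn with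
  | nil => simp at h
  | append_singleton xs x ih =>
    by_cases hx : x = '.'
    · exact ⟨xs, [], by simp [hx], by simp⟩
    · have hm : '.' ∈ xs := by
        rcases List.mem_append.mp h with h1 | h1
        · exact h1
        · simp at h1; exact absurd h1.symm hx
      obtain ⟨l, r, rfl, hr⟩ := ih hm
      exact ⟨l, r ++ [x], by simp, by simp [hr, Ne.symm hx]⟩

theorem pyRsplitDotHead_eq (l r : List Char) (hr : '.' ∉ r) :
    pyRsplitDotHead (l ++ '.' :: r) = l := by
  unfold pyRsplitDotHead
  have h1 : (l ++ '.' :: r).reverse = r.reverse ++ '.' :: l.reverse := by simp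
  rw [h1, List.dropWhile_append_of_pos (by intro a ha; simp at ha ⊢; intro hc; exact hr (hc ▸ ha))]
  simp

theorem dotPrefixes_append_dot (l r : List Char) (hr : '.' ∉ r) :
    dotPrefixes (l ++ '.' :: r) = dotPrefixes l ++ [l] := by
  unfold dotPrefixes
  rw [PySem.List.enumerate_append, PySem.List.enumerate_cons, List.filter_append, List.filter_cons]
  have hrfil : (PySem.List.enumerate r ((0:Int) + l.length + 1)).filter (fun p => p.2 == '.') = [] := by
    rw [List.filter_eq_nil_iff]
    intro p hp
    rw [PySem.List.mem_enumerate_iff] at hp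
    obtain ⟨k, hk, rfl⟩ := hp
    simp only [beq_iff_eq]
    intro hc
    exact hr (hc ▸ List.getElem_mem hk)
  simp only [hrfil]
  rw [List.map_append]
  congr 1
  · -- prefixes cut inside l agree with l's own prefixes
    apply List.map_congr_left
    intro p hp
    have hp' := List.mem_filter.mp hp |>.1
    rw [PySem.List.mem_enumerate_iff] at hp'
    obtain ⟨k, hk, rfl⟩ := hp'
    have : ((0:Int) + k) = (k : Int) := by ring
    simp only [this]
    have h1 : PySem.Chars.slice (l ++ '.' :: r) none (some (k:Int)) = (l ++ '.' :: r).take k := by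
      simp [pysem]
    have h2 : PySem.Chars.slice l none (some (k:Int)) = l.take k := by simp [pysem]
    rw [h1, h2, List.take_append_of_le_length (le_of_lt hk)]
  · -- the last dot (at position l.length) contributes the prefix l
    simp only [beq_self_eq_true, if_pos]
    simp only [List.map_cons, List.map_nil]
    congr 1
    have : ((0:Int) + l.length) = (l.length : Int) := by ring
    rw [this]
    have h1 : PySem.Chars.slice (l ++ '.' :: r) none (some (l.length:Int)) = (l ++ '.' :: r).take l.length := by
      simp [pysem]
    rw [h1, List.take_append_of_le_length le_rfl, List.take_length]

-- A's loop is the first hit scanning the dot prefixes from longest to shortest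
theorem nearestLoop_eq (modules : List String) :
    ∀ (n : Nat) (cs : List Char), cs.length ≤ n →
    nearestLoop modules cs =
      ((dotPrefixes cs).reverse.find? (fun c => decide (String.ofList c ∈ modules))).map String.ofList := by
  intro n
  induction n with
  | zero =>
    intro cs hn
    have : cs = [] := List.length_eq_zero_iff.mp (Nat.le_zero.mp hn)
    subst this
    rw [nearestLoop]
    rw [dif_neg (by
      intro hin
      have := (List.singleton_infix_iff _ _).mp ((PySem.Chars.isIn_iff_infix _ _).mp hin)
      simp at this)]
    simp [dotPrefixes_of_not_mem [] (by simp)]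
  | succ n ih =>
    intro cs hn
    by_cases hd : '.' ∈ cs
    · obtain ⟨l, r, rfl, hr⟩ := exists_last_dot cs hd
      rw [nearestLoop]
      have hin : PySem.Chars.isIn ['.'] (l ++ '.' :: r) = true :=
        (PySem.Chars.isIn_iff_infix _ _).mpr ((List.singleton_infix_iff _ _).mpr hd)
      rw [dif_pos hin]
      simp only [pyRsplitDotHead_eq l r hr]
      rw [dotPrefixes_append_dot l r hr]
      rw [List.reverse_append, List.reverse_singleton, List.singleton_append, List.find?_cons]
      by_cases hmem : String.ofList l ∈ modules
      · simp [hmem]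
      · simp only [hmem, decide_false, if_false]
        exact ih l (by simp at hn; omega)
    · rw [nearestLoop]
      rw [dif_neg (by
        intro hin
        exact hd ((List.singleton_infix_iff _ _).mp ((PySem.Chars.isIn_iff_infix _ _).mp hin)))]
      simp [dotPrefixes_of_not_mem cs hd]

-- B's candidate list has strictly increasing lengths
theorem dotPrefixes_lengths (cs : List Char) :
    ∀ (n : Nat), cs.length ≤ n →
    (dotPrefixes cs ++ [cs]).Pairwise (fun a b => a.length < b.length) := by
  suffices h : ∀ (n : Nat) (cs : List Char), cs.length ≤ n →
      (dotPrefixes cs ++ [cs]).Pairwise (fun a b => a.length < b.length) by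
    intro n hn; exact h n cs hn
  intro n
  induction n with
  | zero =>
    intro cs hn
    have : cs = [] := List.length_eq_zero_iff.mp (Nat.le_zero.mp hn)
    subst this
    simp [dotPrefixes_of_not_mem [] (by simp)]
  | succ n ih =>
    intro cs hn
    by_cases hd : '.' ∈ cs
    · obtain ⟨l, r, rfl, hr⟩ := exists_last_dot cs hd
      rw [dotPrefixes_append_dot l r hr]
      have hln : l.length ≤ n := by simp at hn; omega
      have ihl := ih l hln
      rw [List.append_assoc]
      refine List.pairwise_append.mpr ⟨(List.pairwise_append.mp ihl).1, ?_, ?_⟩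
      · simp
      · intro x hx y hy
        have h1 : x.length < l.length := (List.pairwise_append.mp ihl).2.2 x hx l (by simp)
        simp at hy
        rcases hy with rfl | rfl
        · exact h1
        · simp; omega
    · simp [dotPrefixes_of_not_mem cs hd]

-- Python's max(..., key=len) over a strictly length-increasing list is its last element
theorem max?_len_eq_getLast? (l : List (List Char))
    (h : l.Pairwise (fun a b => a.length < b.length)) :
    PySem.List.max? l (fun c => c.length) = l.getLast? := by
  cases hl : l with
  | nil => simp [PySem.List.max?_eq_none_iff]
  | cons a t =>
    subst hl
    have hne : a :: t ≠ [] := by simp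
    obtain ⟨m, hm⟩ : ∃ m, PySem.List.max? (a :: t) (fun c => c.length) = some m := by
      cases hmx : PySem.List.max? (a :: t) (fun c => c.length) with
      | none => exact absurd ((PySem.List.max?_eq_none_iff _ _).mp hmx) hne
      | some m => exact ⟨m, rfl⟩
    rw [hm]
    have hmem := PySem.List.max?_mem hm
    have hmax := PySem.List.max?_isMax hm
    set L := a :: t
    have hg : L.dropLast ++ [L.getLast hne] = L := List.dropLast_concat_getLast hne
    rw [List.getLast?_eq_some_getLast hne]
    congr 1
    have hpair := h
    rw [← hg] at hpair
    have hcross := (List.pairwise_append.mp hpair).2.2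
    have hmem' : m ∈ L.dropLast ++ [L.getLast hne] := by rw [hg]; exact hmem
    rcases List.mem_append.mp hmem' with hx | hx
    · exfalso
      have h1 : m.length < (L.getLast hne).length := hcross m hx _ (by simp)
      have h2 : (L.getLast hne).length ≤ m.length := hmax _ (List.getLast_mem hne)
      omega
    · simpa using hx

-- ===== VERDICT (by name: the statement is the Claim_ definition above) =====
theorem nearest_project_module_spec : Claim_equal_nearest_project_module := by
  intro modules target _
  unfold Spec_nearest_project_module nearest_project_module nearest_project_module_alt
  dsimp only
  rw [show ((PySem.List.enumerate target.toList 0).filter (fun p => p.2 == '.')).map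
      (fun p => PySem.Chars.slice target.toList none (some p.1)) = dotPrefixes target.toList from rfl]
  have hpw : ((dotPrefixes target.toList ++ [target.toList]).filter
      (fun c => decide (String.ofList c ∈ modules))).Pairwise (fun a b => a.length < b.length) :=
    List.Pairwise.filter _ (dotPrefixes_lengths target.toList target.toList.length le_rfl)
  rw [max?_len_eq_getLast? _ hpw]
  rw [← List.head?_reverse, ← List.filter_reverse, List.head?_filter]
  rw [List.reverse_append, List.reverse_singleton, List.singleton_append, List.find?_cons]
  rw [nearestLoop_eq modules target.toList.length target.toList le_rfl]
  by_cases hmem : target ∈ modules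
  · have : (decide (String.ofList target.toList ∈ modules)) = true := by
      simp [String.ofList_toList, hmem]
    rw [if_pos hmem, this]
    simp [String.ofList_toList]
  · have : (decide (String.ofList target.toList ∈ modules)) = false := by
      simp [String.ofList_toList, hmem]
    rw [if_neg hmem, this]
    cases hfind : (dotPrefixes target.toList).reverse.find?
        (fun c => decide (String.ofList c ∈ modules)) with
    | none => simp
    | some m => simp
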